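-- pv_equiv track=rewrite | github.com/ReedOei/SetTheory | lang.py | bin_cart_prod
-- ===== SOURCE A (Python) =====
-- import itertools as it
--
-- def bin_cart_prod(a, b):
--     a, a_copy = it.tee(a)
--     b, b_copy = it.tee(b)
--     try:
--         yield (next(a_copy), next(b_copy))
--     except StopIteration:
--         return
--     size = 1
--     while True:
--         try:
--             next_a = next(a_copy)
--         except StopIteration:
--             for next_b in b_copy:
--                 a, new_a = it.tee(a)
--                 yield from ((aval, next_b) for aval in new_a)
--             return
--
--         try:
--             next_b = next(b_copy)
--         except StopIteration:
--             # We already got next_a from a_copy, so do this one before we process the rest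
--             b, new_b = it.tee(b)
--             yield from((next_a, bval) for bval in new_b)
--             for next_a in a_copy:
--                 b, new_b = it.tee(b)
--                 yield from((next_a, bval) for bval in new_b)
--             return
--
--         a, new_a = it.tee(a)
--         b, new_b = it.tee(b)
--         yield from ((next(new_a), next_b) for i in range(size))
--         yield from ((next_a, next(new_b)) for i in range(size))
--         yield (next_a, next_b)
--         size += 1
-- ===== SOURCE B (Python) =====
-- def bin_cart_prod(a, b):
--     xs, ys = list(a), list(b)
--     def rank(p):
--         i, j = p
--         k = max(i, j)
--         if i < k:
--             return k * k + i
--         if j < k: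
--             return k * k + k + j
--         return k * k + 2 * k
--     order = sorted(((i, j) for i in range(len(xs)) for j in range(len(ys))), key=rank)
--     return [(xs[i], ys[j]) for i, j in order]
-- ===== Notes on version B (the rewrite author's own statement) =====
-- stated objective: alternative
-- what changed: Replaces A's incremental shell-by-shell emission via chained itertools.tee with a global rank function (the square-shell bijection k^2+offset) computed for every index pair, followed by a single sort of the whole product by rank.
import Mathlib
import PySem

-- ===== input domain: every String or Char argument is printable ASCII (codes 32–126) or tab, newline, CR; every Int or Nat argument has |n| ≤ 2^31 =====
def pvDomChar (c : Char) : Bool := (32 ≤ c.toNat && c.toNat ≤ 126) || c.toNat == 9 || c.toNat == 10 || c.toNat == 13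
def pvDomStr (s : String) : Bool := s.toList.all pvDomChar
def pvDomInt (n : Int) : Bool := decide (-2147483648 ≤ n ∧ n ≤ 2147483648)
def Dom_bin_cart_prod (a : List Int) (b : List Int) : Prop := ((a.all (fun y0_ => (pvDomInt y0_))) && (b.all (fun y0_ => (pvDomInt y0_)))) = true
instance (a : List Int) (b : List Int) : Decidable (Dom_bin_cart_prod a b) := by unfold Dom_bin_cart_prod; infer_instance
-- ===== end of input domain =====

-- B replaces A's shell-by-shell generator (chained itertools.tee) by a global rank
-- function on index pairs (the square-shell bijection k^2+offset) and one sort of the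
-- whole index product by that rank. Equivalence is about the returned sequence of pairs
-- (A is a generator; we compare the lists they produce).

-- ===== PORT A =====
-- The while-loop of A, transcribed: `ra`/`rb` are the unread suffixes of the two tee
-- copies a_copy/b_copy (both at position `size`); each `a, new_a = it.tee(a)` +
-- `next(new_a)` repeated `size` times reads the first `size` elements of the original
-- stream, i.e. `a.take size`; the exhausted-branch loops become flatMaps over the
-- remaining suffix, pairing with the full other stream (the tee of `a`/`b` from the start).
def binCartLoop (a b : List Int) (ra rb : List Int) (size : Nat) : List (Int × Int) :=
  match ra, rb with
  | [], rb =>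
      -- next(a_copy) raised StopIteration: for next_b in b_copy: yield all of a with next_b
      rb.flatMap (fun nb => a.map (fun av => (av, nb)))
  | na :: ra', [] =>
      -- next(b_copy) raised StopIteration: yield next_a with all of b, then the rest of a_copy
      (b.map (fun bv => (na, bv))) ++ ra'.flatMap (fun nx => b.map (fun bv => (nx, bv)))
  | na :: ra', nb :: rb' =>
      ((a.take size).map (fun av => (av, nb)))
        ++ ((b.take size).map (fun bv => (na, bv)))
        ++ [(na, nb)]
        ++ binCartLoop a b ra' rb' (size + 1)

def bin_cart_prod (a : List Int) (b : List Int) : List (Int × Int) :=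
  match a, b with
  | a0 :: _, b0 :: _ => (a0, b0) :: binCartLoop a b (a.drop 1) (b.drop 1) 1
  | _, _ => []          -- the initial `next` raised StopIteration

-- ===== PORT B =====
-- Source B's rank(p): the position of index pair p in the square-shell enumeration,
-- k*k + (i | k+j | 2k) with k = max i j.
def pvRank (p : Nat × Nat) : Nat :=
  let k := max p.1 p.2
  if p.1 < k then k * k + p.1
  else if p.2 < k then k * k + k + p.2
  else k * k + 2 * k

-- Source B: sort the full index product by rank, then map each index pair to its values.
def bin_cart_prod_alt (a : List Int) (b : List Int) : List (Int × Int) :=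
  let order := PySem.List.sorted
      ((List.range a.length).flatMap (fun i => (List.range b.length).map (fun j => (i, j))))
      pvRank
  order.map (fun p => (a.getD p.1 0, b.getD p.2 0))

-- ===== PRECONDITION & SPEC =====
def Spec_bin_cart_prod (a : List Int) (b : List Int) (out : List (Int × Int)) : Prop := out = bin_cart_prod_alt a b
instance (a : List Int) (b : List Int) (out : List (Int × Int)) : Decidable (Spec_bin_cart_prod a b out) := by unfold Spec_bin_cart_prod; infer_instance

-- ===== CLAIM =====
def Claim_equal_bin_cart_prod : Prop := ∀ (a : List Int) (b : List Int), Dom_bin_cart_prod a b → Spec_bin_cart_prod a b (bin_cart_prod a b)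

-- ===== LEMMAS AND PROOFS =====

-- the k-th square shell of INDEX pairs (n, m are the two lengths)
def idxShell (n m k : Nat) : List (Nat × Nat) :=
  if k < n ∧ k < m then
    (List.range k).map (fun i => (i, k))
      ++ (List.range k).map (fun j => (k, j))
      ++ [(k, k)]
  else if k < m then
    (List.range n).map (fun i => (i, k))
  else
    (List.range m).map (fun j => (k, j))

-- the k-th square shell of VALUE pairs
def shell (a b : List Int) (k : Nat) : List (Int × Int) :=
  if k < a.length ∧ k < b.length then
    (List.range k).map (fun i => (a.getD i 0, b.getD k 0))
      ++ (List.range k).map (fun j => (a.getD k 0, b.getD j 0))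
      ++ [(a.getD k 0, b.getD k 0)]
  else if k < b.length then
    (List.range a.length).map (fun i => (a.getD i 0, b.getD k 0))
  else
    (List.range b.length).map (fun j => (a.getD k 0, b.getD j 0))

theorem shell_eq_map_idxShell (a b : List Int) (k : Nat) :
    shell a b k = (idxShell a.length b.length k).map (fun p => (a.getD p.1 0, b.getD p.2 0)) := by
  unfold shell idxShell
  split_ifs <;> simp [List.map_map, Function.comp_def]

-- rank of a column / row / diagonal pair of shell k
theorem rank_col {i k : Nat} (h : i < k) : pvRank (i, k) = k * k + i := by
  simp [pvRank, Nat.max_eq_right (le_of_lt h), h]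

theorem rank_row {j k : Nat} (h : j < k) : pvRank (k, j) = k * k + k + j := by
  simp [pvRank, Nat.max_eq_left (le_of_lt h), h]

theorem rank_diag (k : Nat) : pvRank (k, k) = k * k + 2 * k := by
  simp [pvRank]

-- rank bounds: every pair with max of coordinates k has rank in [k*k, k*k+2k]
theorem rank_lb (p : Nat × Nat) : (max p.1 p.2) * (max p.1 p.2) ≤ pvRank p := by
  unfold pvRank; dsimp only; split_ifs <;> omega

theorem rank_ub (p : Nat × Nat) : pvRank p ≤ (max p.1 p.2) * (max p.1 p.2) + 2 * (max p.1 p.2) := by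
  unfold pvRank; dsimp only
  have h1 : p.1 ≤ max p.1 p.2 := le_max_left _ _
  have h2 : p.2 ≤ max p.1 p.2 := le_max_right _ _
  split_ifs <;> omega

theorem mem_idxShell (n m k : Nat) (hk : k < max n m) (p : Nat × Nat) :
    p ∈ idxShell n m k ↔ max p.1 p.2 = k ∧ p.1 < n ∧ p.2 < m := by
  obtain ⟨i, j⟩ := p
  unfold idxShell
  split_ifs with h1 h2
  · simp only [List.mem_append, List.mem_map, List.mem_range, List.mem_singleton,
      Prod.mk.injEq]
    constructor
    · rintro ((⟨x, hx, rfl, rfl⟩ | ⟨x, hx, rfl, rfl⟩) | ⟨rfl, rfl⟩) <;>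
        refine ⟨by omega, by omega, by omega⟩
    · rintro ⟨hmax, hi, hj⟩
      rcases Nat.lt_trichotomy i j with h | h | h
      · exact Or.inl (Or.inl ⟨i, by omega, rfl, by omega⟩)
      · exact Or.inr ⟨by omega, by omega⟩
      · exact Or.inl (Or.inr ⟨j, by omega, by omega, rfl⟩)
  · have hn : n ≤ k := by omega
    simp only [List.mem_map, List.mem_range, Prod.mk.injEq]
    constructor
    · rintro ⟨x, hx, rfl, rfl⟩; exact ⟨by omega, by omega, h2⟩
    · rintro ⟨hmax, hi, hj⟩
      exact ⟨i, hi, rfl, by omega⟩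
  · have hm : m ≤ k := by omega
    have hn : k < n := by omega
    simp only [List.mem_map, List.mem_range, Prod.mk.injEq]
    constructor
    · rintro ⟨x, hx, rfl, rfl⟩; exact ⟨by omega, hn, by omega⟩
    · rintro ⟨hmax, hi, hj⟩
      exact ⟨j, hj, by omega, rfl⟩

-- within one shell, ranks strictly increase along the list
theorem idxShell_pairwise (n m k : Nat) :
    (idxShell n m k).Pairwise (fun p q => pvRank p < pvRank q) := by
  have col : ∀ (r : Nat), r ≤ k → ((List.range r).map (fun i => (i, k))).Pairwise
      (fun p q : Nat × Nat => pvRank p < pvRank q) := by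
    intro r hr
    rw [List.pairwise_map, List.pairwise_iff_getElem]
    intro u v hu hv huv
    simp only [List.length_range] at hu hv
    simp only [List.getElem_range]
    rw [rank_col (by omega), rank_col (by omega)]
    omega
  have row : ∀ (r : Nat), r ≤ k → ((List.range r).map (fun j => (k, j))).Pairwise
      (fun p q : Nat × Nat => pvRank p < pvRank q) := by
    intro r hr
    rw [List.pairwise_map, List.pairwise_iff_getElem]
    intro u v hu hv huv
    simp only [List.length_range] at hu hv
    simp only [List.getElem_range]
    rw [rank_row (by omega), rank_row (by omega)]
    omega
  unfold idxShell
  split_ifs with h1 h2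
  · rw [List.pairwise_append]
    refine ⟨(List.pairwise_append).mpr ⟨col k le_rfl, row k le_rfl, ?_⟩, List.pairwise_singleton _ _, ?_⟩
    · intro p hp q hq
      simp only [List.mem_map, List.mem_range] at hp hq
      obtain ⟨x, hx, rfl⟩ := hp
      obtain ⟨y, hy, rfl⟩ := hq
      rw [rank_col hx, rank_row hy]
      omega
    · intro p hp q hq
      simp only [List.mem_singleton] at hq
      subst hq
      simp only [List.mem_append, List.mem_map, List.mem_range] at hp
      rw [rank_diag]
      rcases hp with ⟨x, hx, rfl⟩ | ⟨y, hy, rfl⟩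
      · rw [rank_col hx]; omega
      · rw [rank_row hy]; omega
  · exact col n (by omega)
  · exact row m (by omega)

-- across shells, every rank of shell k1 is below every rank of shell k2 when k1 < k2
theorem idxShell_cross (n m : Nat) (k1 k2 : Nat) (h1 : k1 < max n m) (h2 : k2 < max n m)
    (hlt : k1 < k2) (p : Nat × Nat) (hp : p ∈ idxShell n m k1)
    (q : Nat × Nat) (hq : q ∈ idxShell n m k2) : pvRank p < pvRank q := by
  have hp' := ((mem_idxShell n m k1 h1 p).mp hp).1
  have hq' := ((mem_idxShell n m k2 h2 q).mp hq).1
  have lb := rank_lb q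
  have ub := rank_ub p
  rw [hp'] at ub; rw [hq'] at lb
  nlinarith

-- the flattened shell list is pairwise strictly rank-increasing
theorem shells_pairwise (n m : Nat) :
    ((List.range (max n m)).flatMap (idxShell n m)).Pairwise (fun p q => pvRank p < pvRank q) := by
  rw [List.pairwise_flatMap]
  refine ⟨fun k _ => idxShell_pairwise n m k, ?_⟩
  rw [List.pairwise_iff_getElem]
  intro u v hu hv huv
  simp only [List.length_range] at hu hv
  simp only [List.getElem_range]
  intro p hp q hq
  exact idxShell_cross n m u v hu hv huv p hp q hq

theorem shells_nodup (n m : Nat) :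
    ((List.range (max n m)).flatMap (idxShell n m)).Nodup := by
  have h := shells_pairwise n m
  refine List.Pairwise.imp ?_ h
  intro p q hlt heq
  exact absurd heq (by intro e; subst e; exact lt_irrefl _ hlt)

theorem mem_shells (n m : Nat) (p : Nat × Nat) :
    p ∈ (List.range (max n m)).flatMap (idxShell n m) ↔ p.1 < n ∧ p.2 < m := by
  simp only [List.mem_flatMap, List.mem_range]
  constructor
  · rintro ⟨k, hk, hp⟩
    exact ((mem_idxShell n m k hk p).mp hp).2
  · rintro ⟨hi, hj⟩
    refine ⟨max p.1 p.2, by omega, (mem_idxShell n m _ (by omega) p).mpr ⟨rfl, hi, hj⟩⟩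

theorem prod_nodup (n m : Nat) :
    ((List.range n).flatMap (fun i => (List.range m).map (fun j => (i, j)))).Nodup := by
  rw [List.nodup_flatMap]
  constructor
  · intro x _
    exact List.nodup_range.map (fun a b h => by injection h)
  · refine List.Pairwise.imp ?_ (List.pairwise_lt_range (n := n))
    intro a b hab p hp hq
    simp only [List.mem_map, List.mem_range] at hp hq
    obtain ⟨x, hx, rfl⟩ := hp
    obtain ⟨y, hy, he⟩ := hq
    injection he with e1 e2
    omega

theorem mem_prod (n m : Nat) (p : Nat × Nat) :
    p ∈ (List.range n).flatMap (fun i => (List.range m).map (fun j => (i, j))) ↔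
      p.1 < n ∧ p.2 < m := by
  obtain ⟨i, j⟩ := p
  simp only [List.mem_flatMap, List.mem_range, List.mem_map, Prod.mk.injEq]
  constructor
  · rintro ⟨x, hx, y, hy, rfl, rfl⟩; exact ⟨hx, hy⟩
  · rintro ⟨hi, hj⟩; exact ⟨i, hi, j, hj, rfl, rfl⟩

-- the sorted product IS the shell enumeration
theorem sorted_prod_eq_shells (n m : Nat) :
    PySem.List.sorted ((List.range n).flatMap (fun i => (List.range m).map (fun j => (i, j)))) pvRank
      = (List.range (max n m)).flatMap (idxShell n m) := by
  apply PySem.List.sorted_eq_of_perm_of_pairwise_lt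
  · refine (List.perm_ext_iff_of_nodup (shells_nodup n m) (prod_nodup n m)).mpr ?_
    intro p
    rw [mem_shells, mem_prod]
  · exact shells_pairwise n m

theorem alt_eq_flatMap (a b : List Int) :
    bin_cart_prod_alt a b = (List.range (max a.length b.length)).flatMap (shell a b) := by
  unfold bin_cart_prod_alt
  rw [sorted_prod_eq_shells, List.map_flatMap]
  apply List.flatMap_congr
  intro k _
  exact (shell_eq_map_idxShell a b k).symm

-- ===== A-side lemmas (port A produces the shell enumeration) =====

theorem map_eq_range_map (a : List Int) (f : Int → Int × Int) :
    a.map f = (List.range a.length).map (fun i => f (a.getD i 0)) := by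
  apply List.ext_getElem
  · simp
  · intro i h1 h2
    simp [List.getD_eq_getElem?_getD, List.getElem?_eq_getElem (by simpa using h2)]

theorem take_map_eq_range_map (a : List Int) (s : Nat) (hs : s ≤ a.length) (f : Int → Int × Int) :
    (a.take s).map f = (List.range s).map (fun i => f (a.getD i 0)) := by
  apply List.ext_getElem
  · simp; omega
  · intro i h1 h2
    have hi : i < a.length := by simp at h2; omega
    simp [List.getElem_take, List.getD_eq_getElem?_getD, List.getElem?_eq_getElem hi]

theorem drop_eq_range'_map (b : List Int) (s : Nat) :
    b.drop s = (List.range' s (b.length - s)).map (fun k => b.getD k 0) := by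
  apply List.ext_getElem
  · simp
  · intro i h1 h2
    have hi : s + i < b.length := by simp at h1; omega
    simp [List.getD_eq_getElem?_getD, List.getElem?_eq_getElem hi]

theorem loop_eq_flatMap (a b : List Int) : ∀ (e s : Nat),
    e = max a.length b.length - s → 1 ≤ s →
    binCartLoop a b (a.drop s) (b.drop s) s
      = (List.range' s e).flatMap (shell a b) := by
  intro e
  induction e with
  | zero =>
      intro s he _
      have ha : a.length ≤ s := by omega
      have hb : b.length ≤ s := by omega
      simp [List.drop_eq_nil_of_le ha, List.drop_eq_nil_of_le hb, binCartLoop]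
  | succ e ih =>
      intro s he hs
      have hmax : s < max a.length b.length := by omega
      rcases ha : a.drop s with _ | ⟨na, ra'⟩
      · have hn : a.length ≤ s := by
          have := congrArg List.length ha
          simp at this; omega
        have hm : s < b.length := by omega
        rw [binCartLoop, drop_eq_range'_map b s]
        have hlen : b.length - s = e + 1 := by omega
        rw [hlen]
        rw [List.flatMap_map]
        apply List.flatMap_congr
        intro k hk
        have hks : s ≤ k ∧ k < b.length := by
          have := List.mem_range'.mp hk; omega
        have hkn : ¬ (k < a.length ∧ k < b.length) := by omega
        simp only [shell, if_neg hkn, if_pos hks.2]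
        exact map_eq_range_map a _
      · rcases hb : b.drop s with _ | ⟨nb, rb'⟩
        · have hm : b.length ≤ s := by
            have := congrArg List.length hb
            simp at this; omega
          have hn : s < a.length := by
            have := congrArg List.length ha
            simp at this; omega
          rw [binCartLoop]
          have : (na :: ra').flatMap (fun nx => b.map (fun bv => (nx, bv)))
              = b.map (fun bv => (na, bv)) ++ ra'.flatMap (fun nx => b.map (fun bv => (nx, bv))) := by
            simp
          rw [← this, ← ha, drop_eq_range'_map a s]
          have hlen : a.length - s = e + 1 := by omega
          rw [hlen, List.flatMap_map]
          apply List.flatMap_congr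
          intro k hk
          have hks : s ≤ k ∧ k < a.length := by
            have := List.mem_range'.mp hk; omega
          have hkn : ¬ (k < a.length ∧ k < b.length) := by omega
          have hkm : ¬ k < b.length := by omega
          simp only [shell, if_neg hkn, if_neg hkm]
          exact map_eq_range_map b _
        · have hn : s < a.length := by
            have := congrArg List.length ha
            simp at this; omega
          have hm : s < b.length := by
            have := congrArg List.length hb
            simp at this; omega
          have hna : na = a.getD s 0 ∧ ra' = a.drop (s + 1) := by
            have := List.drop_eq_getElem_cons hn
            rw [ha] at this
            simp only [List.cons.injEq] at this
            refine ⟨?_, this.2⟩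
            rw [this.1]
            simp [List.getD_eq_getElem?_getD, List.getElem?_eq_getElem hn]
          have hnb : nb = b.getD s 0 ∧ rb' = b.drop (s + 1) := by
            have := List.drop_eq_getElem_cons hm
            rw [hb] at this
            simp only [List.cons.injEq] at this
            refine ⟨?_, this.2⟩
            rw [this.1]
            simp [List.getD_eq_getElem?_getD, List.getElem?_eq_getElem hm]
          rw [binCartLoop, hna.2, hnb.2, hna.1, hnb.1,
              ih (s + 1) (by omega) (by omega)]
          have hr : List.range' s (e + 1) = s :: List.range' (s + 1) e := by
            simp [List.range'_succ]
          rw [hr, List.flatMap_cons]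
          simp only [shell, if_pos (And.intro hn hm)]
          rw [take_map_eq_range_map a s (by omega), take_map_eq_range_map b s (by omega)]

-- ===== VERDICT =====
theorem bin_cart_prod_spec : Claim_equal_bin_cart_prod := by
  intro a b _
  show bin_cart_prod a b = bin_cart_prod_alt a b
  rw [alt_eq_flatMap]
  rcases a with _ | ⟨a0, at'⟩
  · simp only [bin_cart_prod]
    symm
    rw [List.flatMap_eq_nil_iff]
    intro k hk
    have hm := List.mem_range.mp hk
    simp only [List.length_nil, Nat.zero_max] at hm
    simp [shell, hm]
  · rcases b with _ | ⟨b0, bt'⟩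
    · simp only [bin_cart_prod]
      symm
      rw [List.flatMap_eq_nil_iff]
      intro k hk
      simp only [shell]
      simp
    · simp only [bin_cart_prod]
      rw [loop_eq_flatMap (a0 :: at') (b0 :: bt') (max (a0 :: at').length (b0 :: bt').length - 1) 1 rfl (by omega)]
      have hM : 1 ≤ max (a0 :: at').length (b0 :: bt').length := by simp
      have : List.range (max (a0 :: at').length (b0 :: bt').length)
          = 0 :: List.range' 1 (max (a0 :: at').length (b0 :: bt').length - 1) := by
        rw [List.range_eq_range']
        cases hM' : max (a0 :: at').length (b0 :: bt').length with
        | zero => omega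
        | succ M => simp [List.range'_succ]
      rw [this, List.flatMap_cons]
      simp [shell]
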